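-- pv_equiv track=rewrite | github.com/Wani29I/MasterProj | createCutPoint/calculateCutPoint.py | clearEndpoint
-- ===== SOURCE A (Python) =====
-- def clearEndpoint(content):
--     removeList = []
--     for i in range(len(content)):
--         if( i!=0 and content[i-1][1] < content[i][1] ):
--             removeList.append(content[i-1])
--     for i in removeList:
--         content.remove(i)
--     return content
-- ===== SOURCE B (Python) =====
-- # Alternative algorithm: count removals per row value in one pass, then rebuild
-- # skipping the first k occurrences of each flagged value (no list.remove scans);
-- # mutates content in place via slice assignment, like A's in-place removes;
-- # equivalence is about the return value.
-- def clearEndpoint(content):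
--     need = {}
--     for prev, cur in zip(content, content[1:]):
--         if prev[1] < cur[1]:
--             k = tuple(prev)
--             need[k] = need.get(k, 0) + 1
--     kept = []
--     for row in content:
--         k = tuple(row)
--         if need.get(k, 0) > 0:
--             need[k] -= 1
--         else:
--             kept.append(row)
--     content[:] = kept
--     return content
-- ===== Notes on version B (the rewrite author's own statement) =====
-- stated objective: alternative
-- what changed: A collects flagged predecessors then calls list.remove (a linear scan) for each removal; B instead counts in one pass how many times each row value must be removed and rebuilds the list in a second pass skipping the first k occurrences of each counted value.
-- outside the precondition, e.g. on clearEndpoint([[0], [1]]): A raises IndexError, B raises IndexError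
import Mathlib
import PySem

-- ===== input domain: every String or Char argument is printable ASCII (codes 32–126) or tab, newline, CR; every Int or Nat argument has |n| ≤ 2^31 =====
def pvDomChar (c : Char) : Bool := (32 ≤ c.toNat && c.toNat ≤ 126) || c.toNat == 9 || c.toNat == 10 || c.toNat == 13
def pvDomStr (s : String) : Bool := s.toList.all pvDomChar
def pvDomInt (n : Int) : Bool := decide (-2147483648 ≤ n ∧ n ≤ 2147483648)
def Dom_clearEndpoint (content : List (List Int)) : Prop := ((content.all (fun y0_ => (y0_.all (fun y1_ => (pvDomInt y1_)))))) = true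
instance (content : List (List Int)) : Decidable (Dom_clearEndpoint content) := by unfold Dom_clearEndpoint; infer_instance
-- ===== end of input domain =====

-- B replaces A's collect-then-list.remove strategy with one counting pass and a
-- counter-guided rebuild (objective: alternative). Both Pythons mutate `content` in
-- place (A via remove, B via slice assignment); the theorems are about the return value.

-- ===== PORT A =====
def clearEndpoint (content : List (List Int)) : List (List Int) :=
  let removeList :=
    (PySem.List.pyRange 0 (content.length : Int) 1).foldl
      (fun acc i =>
        if i ≠ 0 ∧ PySem.List.pyGetD (PySem.List.pyGetD content (i - 1) []) 1 0 <
                   PySem.List.pyGetD (PySem.List.pyGetD content i []) 1 0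
        then acc ++ [PySem.List.pyGetD content (i - 1) []]
        else acc) []
  removeList.foldl (fun c v => (PySem.List.remove? c v).getD c) content

-- ===== PORT B =====
def clearEndpoint_alt (content : List (List Int)) : List (List Int) :=
  -- zip(content, content[1:]) = content.zip (content.drop 1); tuple(row) keys are the rows themselves
  let need := (content.zip (content.drop 1)).foldl
      (fun (d : PySem.Dict (List Int) Int) pc =>
        if PySem.List.pyGetD pc.1 1 0 < PySem.List.pyGetD pc.2 1 0
        then d.insert pc.1 (d.getD pc.1 0 + 1) else d)
      PySem.Dict.empty
  let r := content.foldl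
      (fun (s : PySem.Dict (List Int) Int × List (List Int)) row =>
        if s.1.getD row 0 > 0 then (s.1.insert row (s.1.getD row 0 - 1), s.2)
        else (s.1, s.2 ++ [row]))
      (need, [])
  r.2

-- ===== PRECONDITION & SPEC =====
-- Pre_ excludes exactly the inputs where Python A raises IndexError: a row shorter
-- than 2 entries while the list has at least 2 rows (then every row's [1] is read).
def Pre_clearEndpoint (content : List (List Int)) : Prop :=
  content.length ≤ 1 ∨ ∀ row ∈ content, 2 ≤ row.length
instance (content : List (List Int)) : Decidable (Pre_clearEndpoint content) := by
  unfold Pre_clearEndpoint; infer_instance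

def pvWitness_clearEndpoint : List (List Int) := [[0, 1], [0, 2], [0, 1]]

def Spec_clearEndpoint (content : List (List Int)) (out : List (List Int)) : Prop := out = clearEndpoint_alt content
instance (content : List (List Int)) (out : List (List Int)) : Decidable (Spec_clearEndpoint content out) := by unfold Spec_clearEndpoint; infer_instance

-- ===== CLAIM (what is proved, stated in full; the proofs are below) =====
def Claim_equal_clearEndpoint : Prop := ∀ (content : List (List Int)), Dom_clearEndpoint content → Pre_clearEndpoint content → Spec_clearEndpoint content (clearEndpoint content)

-- ===== LEMMAS AND PROOFS =====

-- the list of flagged predecessors, structurally on consecutive pairs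
def pvFlags : List (List Int) → List (List Int)
  | x :: y :: rest =>
      (if x.getD 1 0 < y.getD 1 0 then [x] else []) ++ pvFlags (y :: rest)
  | _ => []

-- remove-first totalized
def pvRm (xs : List (List Int)) (v : List Int) : List (List Int) :=
  (PySem.List.remove? xs v).getD xs

-- rebuild guided by a count function
def pvSkip (cnt : List Int → Int) : List (List Int) → List (List Int)
  | [] => []
  | x :: xs =>
      if cnt x > 0 then pvSkip (fun v => if v = x then cnt v - 1 else cnt v) xs
      else x :: pvSkip cnt xs

theorem pvRm_cons (x v : List Int) (xs : List (List Int)) :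
    pvRm (x :: xs) v = if x = v then xs else x :: pvRm xs v := by
  by_cases h : x = v
  · subst h; simp [pvRm]
  · rw [pvRm, PySem.List.remove?_cons_of_ne xs h]
    cases hr : PySem.List.remove? xs v <;> simp [pvRm, hr, h]

theorem pvSkip_congr (cnt cnt' : List Int → Int) (h : ∀ v, cnt v = cnt' v)
    (xs : List (List Int)) : pvSkip cnt xs = pvSkip cnt' xs := by
  have : cnt = cnt' := funext h
  rw [this]

theorem pvSkip_zero (cnt : List Int → Int) (h : ∀ v, cnt v = 0) (xs : List (List Int)) :
    pvSkip cnt xs = xs := by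
  induction xs generalizing cnt with
  | nil => rfl
  | cons x xs ih =>
      rw [pvSkip]
      rw [if_neg (by simp [h x])]
      rw [ih cnt h]

-- bumping the count of m by one = removing the first m beforehand
theorem pvSkip_bump (xs : List (List Int)) (cnt : List Int → Int) (m : List Int)
    (hnn : ∀ v, 0 ≤ cnt v) :
    pvSkip (fun v => cnt v + if v = m then 1 else 0) xs = pvSkip cnt (pvRm xs m) := by
  induction xs generalizing cnt with
  | nil => simp [pvRm, PySem.List.remove?, pvSkip]
  | cons x xs ih =>
      rw [pvRm_cons]
      by_cases hxm : x = m
      · subst hxm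
        rw [if_pos rfl, pvSkip]
        rw [if_pos (by have := hnn x; simp; omega)]
        exact pvSkip_congr _ _ (by intro v; by_cases hv : v = x <;> simp [hv]) xs
      · rw [if_neg hxm]
        by_cases hc : cnt x > 0
        · rw [pvSkip, if_pos (by simp [hxm]; omega), pvSkip, if_pos hc]
          have := ih (fun v => if v = x then cnt v - 1 else cnt v)
            (by intro v; by_cases hv : v = x <;> simp [hv] <;> [omega; exact hnn v])
          rw [← this]
          exact pvSkip_congr _ _ (by
            intro v
            by_cases hv : v = x
            · subst hv; simp [hxm]
            · simp [hv]) xs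
        · rw [pvSkip, if_neg (by simp [hxm]; omega), pvSkip, if_neg hc, ih cnt hnn]

-- A's second loop = counter-guided skip of the flag counts
theorem pvRemoveAll_eq_skip (ms xs : List (List Int)) :
    ms.foldl pvRm xs = pvSkip (fun v => (ms.count v : Int)) xs := by
  induction ms generalizing xs with
  | nil => exact (pvSkip_zero _ (by simp) xs).symm
  | cons m ms ih =>
      rw [List.foldl_cons, ih (pvRm xs m)]
      rw [← pvSkip_bump xs (fun v => (ms.count v : Int)) m (fun v => Int.natCast_nonneg _)]
      exact pvSkip_congr _ _ (by
        intro v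
        by_cases hv : v = m
        · subst hv; simp [List.count_cons]
        · simp [List.count_cons, hv, Ne.symm hv]) xs

-- B's second loop = counter-guided skip of the dict's counts
theorem pvRebuild_eq_skip (xs : List (List Int)) (d : PySem.Dict (List Int) Int)
    (acc : List (List Int)) :
    (xs.foldl
      (fun (s : PySem.Dict (List Int) Int × List (List Int)) row =>
        if s.1.getD row 0 > 0 then (s.1.insert row (s.1.getD row 0 - 1), s.2)
        else (s.1, s.2 ++ [row]))
      (d, acc)).2 = acc ++ pvSkip (fun v => d.getD v 0) xs := by
  induction xs generalizing d acc with
  | nil => simp [pvSkip]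
  | cons x xs ih =>
      rw [List.foldl_cons, pvSkip]
      by_cases hc : d.getD x 0 > 0
      · rw [if_pos hc, if_pos hc, ih]
        congr 1
        exact pvSkip_congr _ _ (by
          intro v
          rw [PySem.Dict.getD_insert]
          by_cases hv : v = x <;> simp [hv]) xs
      · rw [if_neg hc, if_neg hc, ih]
        simp

-- B's first loop builds the counter of the flag list
theorem pvNeed_counts (cs : List (List Int)) (d : PySem.Dict (List Int) Int) (v : List Int) :
    ((cs.zip (cs.drop 1)).foldl
      (fun (d : PySem.Dict (List Int) Int) pc =>
        if PySem.List.pyGetD pc.1 1 0 < PySem.List.pyGetD pc.2 1 0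
        then d.insert pc.1 (d.getD pc.1 0 + 1) else d) d).getD v 0
      = d.getD v 0 + ((pvFlags cs).count v : Int) := by
  induction cs generalizing d with
  | nil => simp [pvFlags]
  | cons x cs ih =>
      cases cs with
      | nil => simp [pvFlags]
      | cons y r =>
          have hz : (x :: y :: r).zip ((x :: y :: r).drop 1)
              = (x, y) :: ((y :: r).zip ((y :: r).drop 1)) := by simp
          rw [hz, List.foldl_cons, pvFlags]
          by_cases hcond : PySem.List.pyGetD x 1 0 < PySem.List.pyGetD y 1 0
          · have hg : x.getD 1 0 < y.getD 1 0 := by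
              simpa [PySem.List.pyGetD_ofNat'] using hcond
            rw [if_pos hcond, if_pos hg, ih]
            rw [PySem.Dict.getD_insert]
            by_cases hv : v = x <;> simp [hv, List.count_cons, eq_comm] <;> omega
          · have hg : ¬ x.getD 1 0 < y.getD 1 0 := by
              simpa [PySem.List.pyGetD_ofNat'] using hcond
            rw [if_neg hcond, if_neg hg, ih]
            simp

-- pvFlags over a snoc
theorem pvFlags_append_singleton (xs : List (List Int)) (y : List Int) :
    pvFlags (xs ++ [y]) = pvFlags xs ++
      (match xs.getLast? with
        | some l => if l.getD 1 0 < y.getD 1 0 then [l] else []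
        | none => []) := by
  induction xs with
  | nil => simp [pvFlags]
  | cons x xs ih =>
      cases xs with
      | nil => simp [pvFlags]
      | cons z r =>
          have h1 : pvFlags (x :: z :: (r ++ [y])) =
              (if x.getD 1 0 < z.getD 1 0 then [x] else []) ++ pvFlags (z :: (r ++ [y])) := rfl
          have h2 : pvFlags (x :: z :: r) =
              (if x.getD 1 0 < z.getD 1 0 then [x] else []) ++ pvFlags (z :: r) := rfl
          simp only [List.cons_append] at ih ⊢
          rw [h1, ih, h2, List.append_assoc]
          simp [List.getLast?_cons_cons]

-- A's first loop computes pvFlags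
theorem pvRemoveList_eq_flags (cs : List (List Int)) (n : Nat) (hn : n ≤ cs.length) :
    (PySem.List.pyRange 0 (n : Int) 1).foldl
      (fun acc i =>
        if i ≠ 0 ∧ PySem.List.pyGetD (PySem.List.pyGetD cs (i - 1) []) 1 0 <
                   PySem.List.pyGetD (PySem.List.pyGetD cs i []) 1 0
        then acc ++ [PySem.List.pyGetD cs (i - 1) []]
        else acc) []
    = pvFlags (cs.take n) := by
  induction n with
  | zero => simp [PySem.List.pyRange_one_eq_nil, pvFlags]
  | succ n ih =>
      have hn' : n ≤ cs.length := Nat.le_of_succ_le hn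
      have hlt : n < cs.length := hn
      have hsp : ((n : Int) + 1) = ((n + 1 : Nat) : Int) := by push_cast; ring
      rw [show ((n + 1 : Nat) : Int) = (n : Int) + 1 by push_cast; ring,
        PySem.List.pyRange_one_succ_right (by omega),
        List.foldl_append, ih hn']
      have htake : cs.take (n + 1) = cs.take n ++ (cs[n] :: []) := by
        rw [List.take_succ]
        simp [List.getElem?_eq_getElem hlt]
      rw [htake, pvFlags_append_singleton]
      have hgn : PySem.List.pyGetD cs (n : Int) [] = cs[n] := by
        rw [PySem.List.pyGetD_natCast]
        simp [List.getD_eq_getElem?_getD, List.getElem?_eq_getElem hlt]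
      cases n with
      | zero =>
          simp [List.foldl_cons]
      | succ m =>
          have hm : m < cs.length := by omega
          have hgm : PySem.List.pyGetD cs (((Nat.succ m : Nat) : Int) - 1) [] = cs[m] := by
            rw [show (((Nat.succ m : Nat) : Int)) - 1 = ((m : Nat) : Int) by push_cast; ring,
              PySem.List.pyGetD_natCast]
            simp [List.getD_eq_getElem?_getD, List.getElem?_eq_getElem hm]
          have hlast : (cs.take (Nat.succ m)).getLast? = some cs[m] := by
            have ht : List.take (m + 1) cs = List.take m cs ++ [cs[m]] := by
              rw [List.take_succ]
              simp [List.getElem?_eq_getElem hm]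
            rw [Nat.succ_eq_add_one, ht, List.getLast?_append]
            simp
          rw [List.foldl_cons, hlast]
          simp only [List.foldl_nil]
          by_cases hcond : PySem.List.pyGetD (PySem.List.pyGetD cs (((Nat.succ m : Nat) : Int) - 1) []) 1 0 <
              PySem.List.pyGetD (PySem.List.pyGetD cs ((Nat.succ m : Nat) : Int) []) 1 0
          · have hg : cs[m].getD 1 0 < cs[Nat.succ m].getD 1 0 := by
              rw [hgm, hgn] at hcond
              simpa [PySem.List.pyGetD_ofNat'] using hcond
            rw [if_pos ⟨by omega, hcond⟩, if_pos hg, hgm]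
          · have hg : ¬ cs[m].getD 1 0 < cs[Nat.succ m].getD 1 0 := by
              rw [hgm, hgn] at hcond
              simpa [PySem.List.pyGetD_ofNat'] using hcond
            rw [if_neg (by tauto), if_neg hg]
            simp

theorem pvMain (cs : List (List Int)) : clearEndpoint cs = clearEndpoint_alt cs := by
  simp only [clearEndpoint, clearEndpoint_alt]
  rw [pvRemoveList_eq_flags cs cs.length le_rfl, List.take_length]
  have hA : (pvFlags cs).foldl (fun x v => (PySem.List.remove? x v).getD x) cs
      = pvSkip (fun v => ((pvFlags cs).count v : Int)) cs := by
    have := pvRemoveAll_eq_skip (pvFlags cs) cs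
    simpa [pvRm] using this
  rw [hA, pvRebuild_eq_skip]
  rw [List.nil_append]
  exact pvSkip_congr _ _ (by
    intro v
    rw [pvNeed_counts]
    simp) cs

-- ===== VERDICT (by name: the statement is the Claim_ definition above) =====
theorem clearEndpoint_spec : Claim_equal_clearEndpoint := by
  intro content _ _
  unfold Spec_clearEndpoint
  exact pvMain content
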